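-- pv_equiv track=rewrite | github.com/wyk18703232953/myResearch | codeComplex/data/onlyCode/python/np/python_np_0033.py | zeta_transform
-- ===== SOURCE A (Python) =====
-- def zeta_transform(F,n):
--     # res[i] = (iを含む集合jに対する F[j] の和)
--     N = 1 << n
--     res = F[:]
--     for i in range(n):
--         k = 1 << i
--         for j in range(N):
--             if not j & k:
--                 res[j] += res[j^k]
--     return res
-- ===== SOURCE B (Python) =====
-- def zeta_transform(F, n):
--     # Direct superset summation: res[i] = sum of F[j] over all j in range(2**n)
--     # whose bit set contains i's. No in-place bit-layer DP; F is not mutated.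
--     N = 1 << n
--     res = F[:]
--     for i in range(N):
--         res[i] = sum(F[j] for j in range(N) if j & i == i)
--     return res
-- ===== Notes on version B (the rewrite author's own statement) =====
-- stated objective: alternative
-- what changed: Replaces the in-place bit-layer zeta DP (n passes, each combining res[j] with res[j^2^i]) by a direct per-index summation of F over all supersets, computed fresh from F without mutating intermediate state.
-- outside the precondition, e.g. on zeta_transform([], 0): A returns [], B raises IndexError
import Mathlib
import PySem

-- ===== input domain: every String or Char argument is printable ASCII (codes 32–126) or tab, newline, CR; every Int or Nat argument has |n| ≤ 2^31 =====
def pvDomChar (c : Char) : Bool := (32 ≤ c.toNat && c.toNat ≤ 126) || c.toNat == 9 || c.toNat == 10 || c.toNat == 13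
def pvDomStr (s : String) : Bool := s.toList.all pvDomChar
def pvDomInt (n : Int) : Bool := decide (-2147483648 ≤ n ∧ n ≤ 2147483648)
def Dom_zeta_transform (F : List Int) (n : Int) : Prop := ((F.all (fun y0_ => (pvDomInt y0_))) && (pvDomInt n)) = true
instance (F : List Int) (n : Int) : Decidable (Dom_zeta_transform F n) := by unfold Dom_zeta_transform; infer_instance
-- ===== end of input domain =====

-- B replaces the in-place bit-layer zeta DP by a direct per-index summation of F over supersets (alternative algorithm, not faster).


-- ===== PORT A =====
-- literal port of A; '1 << n' / '1 << i' shift by n.toNat / i.toNat, exact since Pre_ gives 0 ≤ n (Python raises on n < 0)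
def zeta_transform (F : List Int) (n : Int) : List Int :=
  let N : Int := (2 : Int) ^ n.toNat  -- 1 << n (n ≥ 0 under Pre_)
  let res := F
  (PySem.List.pyRange 0 n 1).foldl (fun res i =>
    let k : Int := (2 : Int) ^ i.toNat  -- 1 << i
    (PySem.List.pyRange 0 N 1).foldl (fun res j =>
      if PySem.Int.band j k == 0 then
        PySem.List.pySetD res j (PySem.List.pyGetD res j 0 + PySem.List.pyGetD res (PySem.Int.bxor j k) 0)
      else res) res) res

-- ===== PORT B =====
-- literal port of Source B: res[i] = sum(F[j] for j in range(N) if j & i == i)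
def zeta_transform_alt (F : List Int) (n : Int) : List Int :=
  let N : Int := (2 : Int) ^ n.toNat  -- 1 << n (n ≥ 0 under Pre_)
  (PySem.List.pyRange 0 N 1).foldl (fun res i =>
    PySem.List.pySetD res i
      ((((PySem.List.pyRange 0 N 1).filter (fun j => PySem.Int.band j i == i)).map
        (fun j => PySem.List.pyGetD F j 0)).sum)) F

-- ===== PRECONDITION & SPEC =====
-- Pre_ excludes n < 0 (A raises ValueError on '1 << n') and F shorter than 2^n, where A raises
-- IndexError — except the single corner len(F) = 0 ∧ n = 0, where A returns [] but B raises IndexError.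
def Pre_zeta_transform (F : List Int) (n : Int) : Prop := 0 ≤ n ∧ 2 ^ n.toNat ≤ F.length
instance (F : List Int) (n : Int) : Decidable (Pre_zeta_transform F n) := by unfold Pre_zeta_transform; infer_instance
def pvWitness_zeta_transform : List Int × Int := ([3, 5], 1)

def Spec_zeta_transform (F : List Int) (n : Int) (out : List Int) : Prop := out = zeta_transform_alt F n
instance (F : List Int) (n : Int) (out : List Int) : Decidable (Spec_zeta_transform F n out) := by unfold Spec_zeta_transform; infer_instance

-- ===== CLAIM (what is proved, stated in full; the proofs are below) =====
def Claim_equal_zeta_transform : Prop := ∀ (F : List Int) (n : Int), Dom_zeta_transform F n → Pre_zeta_transform F n → Spec_zeta_transform F n (zeta_transform F n)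

-- ===== LEMMAS AND PROOFS =====

-- cast helpers for the bridges
lemma pvCastBeq (a b : Nat) : ((a : Int) == (b : Int)) = (a == b) := by
  apply Bool.eq_iff_iff.mpr; simp

lemma pvPowToNat (k : Nat) : ((2 : Int) ^ k).toNat = 2 ^ k := by
  rw [show ((2 : Int) ^ k) = ((2 ^ k : Nat) : Int) by push_cast; ring, Int.toNat_natCast]

lemma pvBandPow (j i : Nat) : PySem.Int.band (j : Int) ((2 : Int) ^ i) = ((j &&& 2 ^ i : Nat) : Int) := by
  rw [show ((2 : Int) ^ i) = ((2 ^ i : Nat) : Int) by push_cast; ring, PySem.Int.band_natCast]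

lemma pvBxorPow (j i : Nat) : PySem.Int.bxor (j : Int) ((2 : Int) ^ i) = ((j ^^^ 2 ^ i : Nat) : Int) := by
  rw [show ((2 : Int) ^ i) = ((2 ^ i : Nat) : Int) by push_cast; ring, PySem.Int.bxor_natCast]

-- Nat-level reformulations of the two ports (pvBridgeA/pvBridgeB prove they are the ports)
def pvStepA (i : Nat) (res : List Int) (j : Nat) : List Int :=
  if j &&& 2 ^ i = 0 then res.set j (res.getD j 0 + res.getD (j ^^^ 2 ^ i) 0) else res

def pvNatA (m : Nat) (F : List Int) : List Int :=
  (List.range m).foldl (fun res i => (List.range (2 ^ m)).foldl (pvStepA i) res) F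

def pvSumB (m : Nat) (F : List Int) (i : Nat) : Int :=
  (((List.range (2 ^ m)).filter (fun j => j &&& i == i)).map (fun j => F.getD j 0)).sum

def pvNatB (m : Nat) (F : List Int) : List Int :=
  (List.range (2 ^ m)).foldl (fun res i => res.set i (pvSumB m F i)) F

-- condition "s is a superset of t and agrees with t from bit i upward"
def pvC (i t s : Nat) : Bool := (s &&& t == t) && (s >>> i == t >>> i)

-- partial zeta sum after the first i bit-passes
def pvS (m i t : Nat) (F : List Int) : Int :=
  (((List.range (2 ^ m)).filter (pvC i t)).map (fun s => F.getD s 0)).sum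

lemma pvBridgeA (F : List Int) (n : Int) : zeta_transform F n = pvNatA n.toNat F := by
  unfold zeta_transform pvNatA pvStepA
  simp [PySem.List.pyRange_one, List.foldl_map, pvPowToNat, pvBandPow, pvBxorPow,
    PySem.List.pySetD_natCast, PySem.List.pyGetD_natCast]

lemma pvBridgeB (F : List Int) (n : Int) : zeta_transform_alt F n = pvNatB n.toNat F := by
  unfold zeta_transform_alt pvNatB pvSumB
  simp [PySem.List.pyRange_one, List.foldl_map, List.filter_map, List.map_map,
    pvPowToNat, pvCastBeq, PySem.Int.band_natCast,
    PySem.List.pySetD_natCast, PySem.List.pyGetD_natCast, Function.comp_def]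

-- == bit-level facts ==
lemma pvAndPowEq (x i : Nat) : x &&& 2 ^ i = 0 ↔ x.testBit i = false := by
  rw [Nat.and_two_pow]
  cases h : x.testBit i <;> simp

lemma pvXorBit (t i b : Nat) : (t ^^^ 2 ^ i).testBit b = if b = i then !t.testBit b else t.testBit b := by
  rw [Nat.testBit_xor]
  by_cases h : b = i
  · subst h; simp [Nat.testBit_two_pow_self]
  · rw [Nat.testBit_two_pow_of_ne (fun he => h he.symm)]; simp [h]

lemma pvAndEq (s t : Nat) : s &&& t = t ↔ ∀ b, t.testBit b = true → s.testBit b = true := by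
  constructor
  · intro h b hb
    have h2 := congrArg (Nat.testBit · b) h
    simp only [Nat.testBit_and, hb, Bool.and_true] at h2
    exact h2
  · intro h; apply Nat.eq_of_testBit_eq; intro b
    rw [Nat.testBit_and]
    cases hb : t.testBit b
    · simp
    · simp [h b hb]

lemma pvShiftEq (x y i : Nat) : x >>> i = y >>> i ↔ ∀ b, i ≤ b → x.testBit b = y.testBit b := by
  constructor
  · intro h b hb
    have h2 := congrArg (Nat.testBit · (b - i)) h
    simpa [Nat.testBit_shiftRight, Nat.add_sub_cancel' hb] using h2
  · intro h; apply Nat.eq_of_testBit_eq; intro b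
    simp only [Nat.testBit_shiftRight]
    exact h (i + b) (by omega)

lemma pvC_testBit (i t s : Nat) : pvC i t s = true ↔
    (∀ b, t.testBit b = true → s.testBit b = true) ∧ (∀ b, i ≤ b → s.testBit b = t.testBit b) := by
  simp [pvC, pvAndEq, pvShiftEq]

lemma pvCzero (t s : Nat) : pvC 0 t s = (s == t) := by
  apply Bool.eq_iff_iff.mpr
  rw [pvC_testBit]
  simp only [beq_iff_eq]
  constructor
  · rintro ⟨h1, h2⟩; exact Nat.eq_of_testBit_eq (fun b => h2 b (Nat.zero_le b))
  · rintro rfl; exact ⟨fun b hb => hb, fun b _ => rfl⟩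

lemma pvCtop (m t s : Nat) (hs : s < 2 ^ m) (ht : t < 2 ^ m) : pvC m t s = (s &&& t == t) := by
  simp [pvC, Nat.shiftRight_eq_div_pow, Nat.div_eq_of_lt hs, Nat.div_eq_of_lt ht]

lemma pvCsame (i t s : Nat) (ht : t.testBit i = true) : pvC (i + 1) t s = pvC i t s := by
  apply Bool.eq_iff_iff.mpr
  rw [pvC_testBit, pvC_testBit]
  constructor
  · rintro ⟨h1, h2⟩
    refine ⟨h1, fun b hb => ?_⟩
    rcases Nat.eq_or_lt_of_le hb with rfl | h
    · rw [ht]; exact h1 _ ht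
    · exact h2 b (by omega)
  · rintro ⟨h1, h2⟩; exact ⟨h1, fun b hb => h2 b (by omega)⟩

lemma pvCsplit (i t s : Nat) (ht : t.testBit i = false) :
    pvC (i + 1) t s = (pvC i t s || pvC i (t ^^^ 2 ^ i) s) := by
  apply Bool.eq_iff_iff.mpr
  simp only [Bool.or_eq_true]
  rw [pvC_testBit, pvC_testBit, pvC_testBit]
  constructor
  · rintro ⟨h1, h2⟩
    cases hs : s.testBit i
    · left
      refine ⟨h1, fun b hb => ?_⟩
      rcases Nat.eq_or_lt_of_le hb with rfl | h
      · rw [hs, ht]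
      · exact h2 b (by omega)
    · right
      refine ⟨fun b hb => ?_, fun b hb => ?_⟩
      · rw [pvXorBit] at hb
        by_cases hbi : b = i
        · subst hbi; exact hs
        · rw [if_neg hbi] at hb; exact h1 b hb
      · rw [pvXorBit]
        by_cases hbi : b = i
        · subst hbi; simp [ht, hs]
        · rw [if_neg hbi]; exact h2 b (by omega)
  · rintro (⟨h1, h2⟩ | ⟨h1, h2⟩)
    · exact ⟨h1, fun b hb => h2 b (by omega)⟩
    · constructor
      · intro b hb
        apply h1
        rw [pvXorBit]
        by_cases hbi : b = i
        · subst hbi; rw [ht] at hb; cases hb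
        · rw [if_neg hbi]; exact hb
      · intro b hb
        have h4 := h2 b (by omega)
        rwa [pvXorBit, if_neg (by omega)] at h4

lemma pvCdisj (i t s : Nat) (ht : t.testBit i = false) :
    ¬(pvC i t s = true ∧ pvC i (t ^^^ 2 ^ i) s = true) := by
  rintro ⟨h1, h2⟩
  rw [pvC_testBit] at h1 h2
  have a := h1.2 i (le_refl i)
  have b := h2.2 i (le_refl i)
  rw [pvXorBit, if_pos rfl, ht] at b
  rw [ht] at a
  rw [a] at b
  cases b

lemma pvSumSplit (p q : Nat → Bool) (f : Nat → Int) :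
    ∀ (l : List Nat), (∀ x ∈ l, ¬(p x = true ∧ q x = true)) →
      ((l.filter (fun x => p x || q x)).map f).sum
        = ((l.filter p).map f).sum + ((l.filter q).map f).sum := by
  intro l
  induction l with
  | nil => simp
  | cons a l ih =>
    intro h
    have hd := h a List.mem_cons_self
    have ih' := ih (fun x hx => h x (List.mem_cons_of_mem _ hx))
    cases hp : p a
    · cases hq : q a
      · simp [hp, hq, ih']
      · simp [hp, hq, ih']; try ring
    · cases hq : q a
      · simp [hp, hq, ih']; try ring
      · exact absurd ⟨hp, hq⟩ hd

-- getD / set bookkeeping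
lemma pvGetDset_ne (l : List Int) (j t : Nat) (v : Int) (h : t ≠ j) :
    (l.set j v).getD t 0 = l.getD t 0 := by
  rw [List.getD_eq_getElem?_getD, List.getD_eq_getElem?_getD,
    List.getElem?_set_ne (fun he => h he.symm)]

lemma pvGetDset_self (l : List Int) (j : Nat) (v : Int) (h : j < l.length) :
    (l.set j v).getD j 0 = v := by
  rw [List.getD_eq_getElem (l.set j v) 0 (by simpa using h)]
  simp

lemma pvFoldlLen {α : Type} (f : List Int → α → List Int)
    (hf : ∀ r x, (f r x).length = r.length) :
    ∀ (l : List α) (res : List Int), (l.foldl f res).length = res.length := by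
  intro l
  induction l with
  | nil => intro res; rfl
  | cons x l ih => intro res; rw [List.foldl_cons, ih, hf]

lemma pvStepALen (i : Nat) (res : List Int) (j : Nat) : (pvStepA i res j).length = res.length := by
  unfold pvStepA; split <;> simp

-- one pass of A evaluated pointwise
lemma pvPassA (i : Nat) :
    ∀ (l : List Nat) (res : List Int), l.Nodup → (∀ j ∈ l, j < res.length) →
      ∀ t, ((l.foldl (pvStepA i) res).getD t 0)
        = if t ∈ l ∧ t &&& 2 ^ i = 0 then res.getD t 0 + res.getD (t ^^^ 2 ^ i) 0
          else res.getD t 0 := by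
  intro l
  induction l with
  | nil => intro res _ _ t; simp
  | cons j l ih =>
    intro res hnd hlen t
    have hnd' := List.nodup_cons.mp hnd
    have hjlen : j < res.length := hlen j (List.mem_cons_self)
    rw [List.foldl_cons,
      ih (pvStepA i res j) hnd'.2
        (fun x hx => by rw [pvStepALen]; exact hlen x (List.mem_cons_of_mem _ hx)) t]
    by_cases hcj : j &&& 2 ^ i = 0
    · simp only [pvStepA, if_pos hcj]
      by_cases hct : t &&& 2 ^ i = 0
      · by_cases htj : t = j
        · subst htj
          rw [if_neg (fun hc => hnd'.1 hc.1),
            if_pos ⟨List.mem_cons_self, hct⟩,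
            pvGetDset_self res t _ hjlen]
        · have hx : t ^^^ 2 ^ i ≠ j := by
            intro he
            have h1 : (t ^^^ 2 ^ i).testBit i = true := by
              rw [pvXorBit, if_pos rfl, (pvAndPowEq t i).mp hct]; rfl
            rw [he, (pvAndPowEq j i).mp hcj] at h1
            cases h1
          rw [pvGetDset_ne res j t _ htj, pvGetDset_ne res j _ _ hx]
          by_cases htl : t ∈ l
          · rw [if_pos ⟨htl, hct⟩, if_pos ⟨List.mem_cons_of_mem _ htl, hct⟩]
          · rw [if_neg (fun hc => htl hc.1),
              if_neg (fun hc => by rcases List.mem_cons.mp hc.1 with h | h; exact htj h; exact htl h)]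
      · have htj : t ≠ j := fun he => hct (he ▸ hcj)
        rw [if_neg (fun hc => hct hc.2), if_neg (fun hc => hct hc.2),
          pvGetDset_ne res j t _ htj]
    · simp only [pvStepA, if_neg hcj]
      by_cases hct : t &&& 2 ^ i = 0
      · have htj : t ≠ j := fun he => hcj (he ▸ hct)
        by_cases htl : t ∈ l
        · rw [if_pos ⟨htl, hct⟩, if_pos ⟨List.mem_cons_of_mem _ htl, hct⟩]
        · rw [if_neg (fun hc => htl hc.1),
            if_neg (fun hc => by rcases List.mem_cons.mp hc.1 with h | h; exact htj h; exact htl h)]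
      · rw [if_neg (fun hc => hct hc.2), if_neg (fun hc => hct hc.2)]

-- B's write loop evaluated pointwise
lemma pvPassB (g : Nat → Int) :
    ∀ (l : List Nat) (res : List Int), l.Nodup → (∀ j ∈ l, j < res.length) →
      ∀ t, ((l.foldl (fun r i => r.set i (g i)) res).getD t 0)
        = if t ∈ l then g t else res.getD t 0 := by
  intro l
  induction l with
  | nil => intro res _ _ t; simp
  | cons j l ih =>
    intro res hnd hlen t
    have hnd' := List.nodup_cons.mp hnd
    have hjlen : j < res.length := hlen j (List.mem_cons_self)
    rw [List.foldl_cons,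
      ih (res.set j (g j)) hnd'.2
        (fun x hx => by rw [List.length_set]; exact hlen x (List.mem_cons_of_mem _ hx)) t]
    by_cases htl : t ∈ l
    · rw [if_pos htl, if_pos (List.mem_cons_of_mem _ htl)]
    · rw [if_neg htl]
      by_cases htj : t = j
      · subst htj
        rw [if_pos (List.mem_cons_self), pvGetDset_self res t _ hjlen]
      · rw [if_neg (fun hc => by rcases List.mem_cons.mp hc with h | h; exact htj h; exact htl h),
          pvGetDset_ne res j t _ htj]

lemma pvPartialLen (F : List Int) (m i : Nat) :
    (((List.range i).foldl (fun res i' => (List.range (2 ^ m)).foldl (pvStepA i') res) F)).length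
      = F.length :=
  pvFoldlLen _ (fun r x => pvFoldlLen (pvStepA x) (pvStepALen x) _ r) _ F

-- the DP invariant: after the first i passes, entry t holds pvS m i t F
lemma pvInv (m : Nat) (F : List Int) (h : 2 ^ m ≤ F.length) :
    ∀ i, i ≤ m → ∀ t,
      (((List.range i).foldl (fun res i' => (List.range (2 ^ m)).foldl (pvStepA i') res) F).getD t 0)
        = if t < 2 ^ m then pvS m i t F else F.getD t 0 := by
  intro i
  induction i with
  | zero =>
    intro _ t
    simp only [List.range_zero, List.foldl_nil]
    by_cases ht : t < 2 ^ m
    · rw [if_pos ht]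
      unfold pvS
      rw [List.filter_congr (fun s _ => pvCzero t s), List.filter_beq, List.count_range,
        if_pos ht]
      simp
    · rw [if_neg ht]
  | succ i ih =>
    intro hi t
    have hil : i < m := by omega
    rw [List.range_succ, List.foldl_append, List.foldl_cons, List.foldl_nil,
      pvPassA i (List.range (2 ^ m)) _ (List.nodup_range)
        (fun x hx => by rw [pvPartialLen]; have := List.mem_range.mp hx; omega) t]
    by_cases ht : t < 2 ^ m
    · by_cases hct : t &&& 2 ^ i = 0
      · have htb : t.testBit i = false := (pvAndPowEq t i).mp hct
        have ht' : t ^^^ 2 ^ i < 2 ^ m :=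
          Nat.xor_lt_two_pow ht (Nat.pow_lt_pow_right (by norm_num) hil)
        rw [if_pos ⟨List.mem_range.mpr ht, hct⟩, ih (by omega) t, ih (by omega) (t ^^^ 2 ^ i),
          if_pos ht, if_pos ht', if_pos ht]
        unfold pvS
        rw [List.filter_congr (fun s _ => pvCsplit i t s htb),
          pvSumSplit _ _ _ _ (fun s _ => pvCdisj i t s htb)]
      · have htb : t.testBit i = true := by
          cases hb : t.testBit i
          · exact absurd ((pvAndPowEq t i).mpr hb) hct
          · rfl
        rw [if_neg (fun hc => hct hc.2), ih (by omega) t, if_pos ht, if_pos ht]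
        unfold pvS
        rw [List.filter_congr (fun s _ => pvCsame i t s htb)]
    · rw [if_neg (fun hc => ht (List.mem_range.mp hc.1)), ih (by omega) t, if_neg ht, if_neg ht]

lemma pvGetDeq (l1 l2 : List Int) (hlen : l1.length = l2.length)
    (h : ∀ t, l1.getD t 0 = l2.getD t 0) : l1 = l2 := by
  apply List.ext_getElem hlen
  intro t h1 h2
  rw [← List.getD_eq_getElem l1 0 h1, ← List.getD_eq_getElem l2 0 h2]
  exact h t

lemma pvNatAB (m : Nat) (F : List Int) (h : 2 ^ m ≤ F.length) : pvNatA m F = pvNatB m F := by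
  apply pvGetDeq
  · rw [pvNatA, pvPartialLen, pvNatB,
      pvFoldlLen _ (fun r x => List.length_set) _ F]
  · intro t
    rw [pvNatA, pvInv m F h m (le_refl m) t,
      pvNatB, pvPassB (pvSumB m F) (List.range (2 ^ m)) F (List.nodup_range)
        (fun x hx => by have := List.mem_range.mp hx; omega) t]
    by_cases ht : t < 2 ^ m
    · rw [if_pos ht, if_pos (List.mem_range.mpr ht)]
      unfold pvS pvSumB
      rw [List.filter_congr (fun s hs => pvCtop m t s (List.mem_range.mp hs) ht)]
    · rw [if_neg ht, if_neg (fun hc => ht (List.mem_range.mp hc))]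

-- ===== VERDICT (by name: the statement is the Claim_ definition above) =====
theorem zeta_transform_spec : Claim_equal_zeta_transform := by
  intro F n _ hpre
  unfold Spec_zeta_transform
  rw [pvBridgeA F n, pvBridgeB F n, pvNatAB n.toNat F hpre.2]
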